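-- pv_equiv track=rewrite | github.com/jordanlgraves/geneforge | geneforge/circuits/evolutionary_simulation.py | generate_all_inputs
-- ===== SOURCE A (Python) =====
-- def generate_all_inputs(num_inputs):
--     inputs = [0] * num_inputs
--     all_inputs = []
--     i = 0
--     while i < num_inputs:
--         all_inputs.append(inputs.copy())
--         inputs[i] = 1 - inputs[i]
--         i += 1 if inputs[i] else 0
--     return all_inputs
-- ===== SOURCE B (Python) =====
-- def generate_all_inputs(num_inputs):
--     return [[1] * i + [0] * (num_inputs - i) for i in range(num_inputs)]
-- ===== Notes on version B (the rewrite author's own statement) =====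
-- stated objective: simpler
-- what changed: B builds each row directly from its index with a closed form ([1]*i + [0]*(n-i)) instead of threading a mutable bit array, copying it and flipping one bit per iteration as A does.
import Mathlib
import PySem

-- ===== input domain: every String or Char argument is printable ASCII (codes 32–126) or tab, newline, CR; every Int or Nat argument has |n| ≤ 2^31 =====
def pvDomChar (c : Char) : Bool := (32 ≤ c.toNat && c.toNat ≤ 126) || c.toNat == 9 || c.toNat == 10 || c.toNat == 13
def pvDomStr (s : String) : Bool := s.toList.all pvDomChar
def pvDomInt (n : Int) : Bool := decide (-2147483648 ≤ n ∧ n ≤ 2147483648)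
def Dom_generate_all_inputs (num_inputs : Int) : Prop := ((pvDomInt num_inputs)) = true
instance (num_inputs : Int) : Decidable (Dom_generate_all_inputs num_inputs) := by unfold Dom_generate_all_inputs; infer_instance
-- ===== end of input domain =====

-- B replaces A's mutated bit array (copied and bit-flipped each iteration) by a closed form
-- building each row directly from its index; objective: simpler.

-- ===== PORT A =====
-- the while loop of A; fuel = num_inputs.toNat suffices, since the value at the new index
-- is always 0 before the flip, so i increases by 1 on every iteration.
def pvLoopA (fuel : Nat) (n : Int) (inputs : List Int) (acc : List (List Int)) (i : Int) :
    List (List Int) :=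
  match fuel with
  | 0 => acc
  | f + 1 =>
    if i < n then
      let acc' := acc ++ [inputs]                          -- all_inputs.append(inputs.copy())
      match PySem.List.pyGet? inputs i with
      | none => acc'                                       -- unreachable: i < n = len(inputs)
      | some v =>
        let inputs' := PySem.List.pySetD inputs i (1 - v)  -- inputs[i] = 1 - inputs[i]
        pvLoopA f n inputs' acc' (i + if (1 - v) ≠ 0 then 1 else 0)  -- i += 1 if inputs[i] else 0
    else acc

def generate_all_inputs (num_inputs : Int) : List (List Int) :=
  pvLoopA num_inputs.toNat num_inputs (List.replicate num_inputs.toNat 0) [] 0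

-- ===== PORT B =====
def generate_all_inputs_alt (num_inputs : Int) : List (List Int) :=
  (PySem.List.pyRange 0 num_inputs 1).map
    (fun i => List.replicate i.toNat 1 ++ List.replicate (num_inputs - i).toNat 0)

-- ===== PRECONDITION & SPEC =====
def Spec_generate_all_inputs (num_inputs : Int) (out : List (List Int)) : Prop := out = generate_all_inputs_alt num_inputs
instance (num_inputs : Int) (out : List (List Int)) : Decidable (Spec_generate_all_inputs num_inputs out) := by unfold Spec_generate_all_inputs; infer_instance

-- ===== CLAIM (what is proved, stated in full; the proofs are below) =====
def Claim_equal_generate_all_inputs : Prop := ∀ (num_inputs : Int), Dom_generate_all_inputs num_inputs → Spec_generate_all_inputs num_inputs (generate_all_inputs num_inputs)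

-- ===== LEMMAS AND PROOFS =====

-- the element just after a block of k ones is the list head of the tail block
lemma pv_get_replicate (k : Nat) (t : List Int) :
    (List.replicate k (1:Int) ++ 0 :: t)[k]? = some 0 := by
  induction k with
  | zero => simp
  | succ m ih => simp [List.replicate_succ, ih]

-- setting the element just after a block of ones to 1 extends the block
lemma pv_set_replicate (k : Nat) (t : List Int) :
    (List.replicate k (1:Int) ++ 0 :: t).set k 1 = List.replicate (k+1) 1 ++ t := by
  induction k with
  | zero => simp
  | succ m ih => simpa [List.replicate_succ] using ih

-- loop invariant: from the state "i ones then n-i zeros" with fuel (n-i).toNat,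
-- the loop appends the rows for indices i, i+1, …, n-1.
lemma pv_loop_inv (f : Nat) : ∀ (n i : Int) (acc : List (List Int)), 0 ≤ i → f = (n - i).toNat →
    pvLoopA f n (List.replicate i.toNat 1 ++ List.replicate (n - i).toNat 0) acc i
      = acc ++ (PySem.List.pyRange i n 1).map
          (fun j => List.replicate j.toNat 1 ++ List.replicate (n - j).toNat 0) := by
  induction f with
  | zero =>
    intro n i acc hi hf
    have hni : n ≤ i := by omega
    simp [pvLoopA, PySem.List.pyRange_one_eq_nil hni]
  | succ m ih =>
    intro n i acc hi hf
    have hin : i < n := by omega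
    have hrep : (n - i).toNat = (n - (i+1)).toNat + 1 := by omega
    have hget : PySem.List.pyGet? (List.replicate i.toNat (1:Int) ++ List.replicate (n - i).toNat 0) i
        = some 0 := by
      rw [PySem.List.pyGet?_of_nonneg _ hi, hrep, List.replicate_succ]
      exact pv_get_replicate i.toNat _
    have hset : PySem.List.pySetD
          (List.replicate i.toNat (1:Int) ++ List.replicate (n - i).toNat 0) i 1
        = List.replicate (i+1).toNat 1 ++ List.replicate (n - (i+1)).toNat 0 := by
      rw [PySem.List.pySetD_of_nonneg _ _ hi, hrep, List.replicate_succ]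
      have h1 : (i+1).toNat = i.toNat + 1 := by omega
      rw [h1, ← pv_set_replicate i.toNat]
    rw [pvLoopA, if_pos hin, hget]
    simp only []
    norm_num
    rw [hset, ih n (i+1) (acc ++ [List.replicate i.toNat 1 ++ List.replicate (n - i).toNat 0])
        (by omega) (by omega)]
    rw [PySem.List.pyRange_one_cons hin]
    simp

-- ===== VERDICT (by name: the statement is the Claim_ definition above) =====
theorem generate_all_inputs_spec : Claim_equal_generate_all_inputs := by
  intro n _
  unfold Spec_generate_all_inputs generate_all_inputs generate_all_inputs_alt
  by_cases hn : n ≤ 0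
  · have h0 : n.toNat = 0 := by omega
    simp [h0, pvLoopA, PySem.List.pyRange_one_eq_nil hn]
  · have := pv_loop_inv n.toNat n 0 [] (le_refl 0) (by omega)
    simpa using this
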